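-- pv_equiv track=rewrite | github.com/NoBashLang/NoBash | programV2/src/compiler/cleanupEmpty.py | separateFunctions
-- ===== SOURCE A (Python) =====
-- def separateFunctions(lines, bracesInfo):
--     funcs = []
--     currentFunc = {}
--     for info in bracesInfo.values():
--         removeOps = []
--         if "ctrlFlowStatement" not in info.keys():
--             continue
--         if info["ctrlFlowStatement"] != "func":
--             continue
--         startOp, endOp = int(info["startOp"]), int(info["endOp"])
--         for op in range(startOp, endOp+1):
--             if str(op) not in lines:
--                 continue
--             currentFunc[str(op)] = lines[str(op)]
--             removeOps.append(str(op))
--         removeOps = list(set(removeOps))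
--         for op in removeOps:
--             del lines[op]
--         funcs.append(currentFunc)
--         currentFunc = {}
--     return lines, funcs
-- ===== SOURCE B (Python) =====
-- def _lineNo(key):
--     try:
--         return int(key)
--     except ValueError:
--         return None
--
--
-- def separateFunctions(lines, bracesInfo):
--     funcs = []
--     for info in bracesInfo.values():
--         if info.get("ctrlFlowStatement") != "func":
--             continue
--         startOp, endOp = int(info["startOp"]), int(info["endOp"])
--         selected = sorted((k for k in lines
--                            if (n := _lineNo(k)) is not None and startOp <= n <= endOp),
--                           key=int)
--         currentFunc = {k: lines[k] for k in selected}
--         for k in selected: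
--             del lines[k]
--         funcs.append(currentFunc)
--     return lines, funcs
-- ===== Notes on version B (the rewrite author's own statement) =====
-- stated objective: alternative
-- what changed: B selects each function's lines by numerically filtering and sorting the keys actually present in `lines` instead of A's scan over every integer in range(startOp, endOp+1); Pre_ excludes inputs where A raises on int(info[...]) and inputs where `lines` has a non-canonical int-like key (e.g. ' 7') whose value falls in a func range, where A's string matching skips the line while B's numeric matching moves it (either behaviour is defensible on such accidental keys).
import Mathlib
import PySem

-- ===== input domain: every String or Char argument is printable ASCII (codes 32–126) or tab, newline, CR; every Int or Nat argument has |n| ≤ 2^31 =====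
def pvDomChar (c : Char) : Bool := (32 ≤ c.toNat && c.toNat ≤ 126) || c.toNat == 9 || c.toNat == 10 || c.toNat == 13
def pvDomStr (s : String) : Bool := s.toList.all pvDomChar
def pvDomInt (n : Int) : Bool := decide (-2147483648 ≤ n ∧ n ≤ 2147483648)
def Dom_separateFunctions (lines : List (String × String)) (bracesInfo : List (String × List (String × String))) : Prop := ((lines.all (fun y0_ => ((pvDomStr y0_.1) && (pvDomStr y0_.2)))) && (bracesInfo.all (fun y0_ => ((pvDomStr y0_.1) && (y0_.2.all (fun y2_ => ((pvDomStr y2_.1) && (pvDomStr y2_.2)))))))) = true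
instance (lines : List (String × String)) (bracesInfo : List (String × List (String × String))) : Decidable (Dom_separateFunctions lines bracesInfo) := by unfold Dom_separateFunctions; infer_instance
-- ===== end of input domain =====

-- B selects each function's lines by numerically filtering and sorting the keys present in `lines`
-- instead of A's scan over every integer in range(startOp, endOp+1); objective: alternative traversal.
-- A mutates `lines` in place (B performs the same deletions); the equivalence proved is about the return value.

-- ===== PORT A =====
-- int(s) where Pre_ guarantees success (PySem.Int.ofStr? is some)
def pvToIntD (s : String) : Int := (PySem.Int.ofStr? s).getD 0

-- the body of A's `for info in bracesInfo.values()` loop; state = (lines, funcs, currentFunc)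
def pvStepA (st : PySem.Dict String String × List (PySem.Dict String String) × PySem.Dict String String)
    (info : PySem.Dict String String) :
    PySem.Dict String String × List (PySem.Dict String String) × PySem.Dict String String :=
  if info.contains "ctrlFlowStatement" = false then st
  else if info.getD "ctrlFlowStatement" "" != "func" then st
  else
    let startOp := pvToIntD (info.getD "startOp" "")
    let endOp := pvToIntD (info.getD "endOp" "")
    let inner := (PySem.List.pyRange startOp (endOp + 1) 1).foldl
      (fun (cr : PySem.Dict String String × List String) op =>
        if st.1.contains (PySem.Int.toStr op) = false then cr
        else (cr.1.insert (PySem.Int.toStr op) (st.1.getD (PySem.Int.toStr op) ""),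
              cr.2 ++ [PySem.Int.toStr op]))
      (st.2.2, ([] : List String))
    let removeOps := PySem.Set.ofList inner.2
    let lines' := removeOps.foldl (fun d k => d.erase k) st.1
    (lines', st.2.1 ++ [inner.1], PySem.Dict.empty)

def separateFunctions (lines : List (String × String)) (bracesInfo : List (String × List (String × String))) : (List (String × String)) × (List (List (String × String))) :=
  let linesD := PySem.Dict.ofList lines
  let bracesD := PySem.Dict.ofList (bracesInfo.map (fun p => (p.1, PySem.Dict.ofList p.2)))
  let st := bracesD.values.foldl pvStepA
    (linesD, ([] : List (PySem.Dict String String)), PySem.Dict.empty)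
  (st.1.items, st.2.1.map (fun d => d.items))

-- ===== PORT B =====
-- _lineNo from Source B: int(key), or None on ValueError
def pvLineNo (k : String) : Option Int := PySem.Int.ofStr? k

-- the body of B's loop; state = (lines, funcs)
def pvStepB (st : PySem.Dict String String × List (PySem.Dict String String))
    (info : PySem.Dict String String) :
    PySem.Dict String String × List (PySem.Dict String String) :=
  if info.get? "ctrlFlowStatement" != some "func" then st
  else
    let startOp := pvToIntD (info.getD "startOp" "")
    let endOp := pvToIntD (info.getD "endOp" "")
    let selected := PySem.List.sorted
      (st.1.keys.filter (fun k =>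
        match pvLineNo k with
        | none => false
        | some n => decide (startOp ≤ n) && decide (n ≤ endOp)))
      (fun k => (PySem.Int.ofStr? k).getD 0)
    let currentFunc := selected.foldl
      (fun (d : PySem.Dict String String) k => d.insert k (st.1.getD k "")) PySem.Dict.empty
    (selected.foldl (fun d k => d.erase k) st.1, st.2 ++ [currentFunc])

def separateFunctions_alt (lines : List (String × String)) (bracesInfo : List (String × List (String × String))) : (List (String × String)) × (List (List (String × String))) :=
  let bracesD := PySem.Dict.ofList (bracesInfo.map (fun p => (p.1, PySem.Dict.ofList p.2)))
  let st := bracesD.values.foldl pvStepB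
    (PySem.Dict.ofList lines, ([] : List (PySem.Dict String String)))
  (st.1.items, st.2.map (fun d => d.items))

-- ===== PRECONDITION & SPEC =====
-- proof-side canonical-decimal reader: pvCanonVal? k = some v iff k is str(v)
def pvRead (k : String) : Option Int :=
  let neg := PySem.Str.startswith k "-"
  let ds := if neg then (PySem.Str.slice k (some 1) none).toList else k.toList
  if ds.isEmpty || !(ds.all (fun c => decide ('0' ≤ c) && decide (c ≤ '9'))) then none
  else
    let n := ds.foldl (fun (n : Int) c => n * 10 + ((c.toNat : Int) - 48)) 0
    if neg then some (-n) else some n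

def pvCanonVal? (k : String) : Option Int :=
  match pvRead k with
  | some v => if PySem.Int.toStr v = k then some v else none
  | none => none

-- the [startOp, endOp] bounds of a braces entry, as Ints (0 where absent/unparsable)
def pvInfoRange (info : PySem.Dict String String) : Int × Int :=
  (((info.get? "startOp").bind PySem.Int.ofStr?).getD 0,
   ((info.get? "endOp").bind PySem.Int.ofStr?).getD 0)

-- v lies in the range of some "func" entry of bracesInfo
def pvInRangeB (bracesInfo : List (String × List (String × String))) (v : Int) : Bool :=
  bracesInfo.any (fun p => (PySem.Dict.ofList p.2).get? "ctrlFlowStatement" == some "func"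
    && decide ((pvInfoRange (PySem.Dict.ofList p.2)).1 ≤ v)
    && decide (v ≤ (pvInfoRange (PySem.Dict.ofList p.2)).2))

-- a canonically-spelt integer key parses to its own value (always true of CPython's int; stated, not proved)
abbrev pvKeyC (k : String) : Prop :=
  (match pvCanonVal? k with
   | some v => PySem.Int.ofStr? k == some v
   | none => true) = true

-- an int()-parsable key whose value lies in a func range is canonically spelt
abbrev pvKeyNC (bracesInfo : List (String × List (String × String))) (k : String) : Prop :=
  (match PySem.Int.ofStr? k with
   | some v => !pvInRangeB bracesInfo v || (PySem.Int.toStr v == k)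
   | none => true) = true

-- Pre_ excludes (a) inputs where A raises: a "func" entry whose "startOp"/"endOp" is missing
-- (KeyError) or rejected by int() (ValueError); and (b) inputs where `lines` has a key that int()
-- accepts in non-canonical spelling (e.g. ' 7', '+5', '07') whose value falls inside a func range:
-- there A's string-keyed matching skips the line while B's numeric matching moves it, and either
-- behaviour is defensible on such accidental keys.
def Pre_separateFunctions (lines : List (String × String)) (bracesInfo : List (String × List (String × String))) : Prop :=
  (∀ info ∈ bracesInfo.map (fun p => PySem.Dict.ofList p.2),
    info.get? "ctrlFlowStatement" = some "func" →
      (((info.get? "startOp").bind PySem.Int.ofStr?).isSome ∧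
       ((info.get? "endOp").bind PySem.Int.ofStr?).isSome))
  ∧ (∀ kv ∈ lines, pvKeyC kv.1 ∧ pvKeyNC bracesInfo kv.1)
instance (lines : List (String × String)) (bracesInfo : List (String × List (String × String))) : Decidable (Pre_separateFunctions lines bracesInfo) := by unfold Pre_separateFunctions; infer_instance

def pvWitness_separateFunctions : (List (String × String)) × (List (String × List (String × String))) :=
  ([("1", "a"), ("2", "b"), ("x", "c")],
   [("f0", [("ctrlFlowStatement", "func"), ("startOp", "1"), ("endOp", "2")])])

def Spec_separateFunctions (lines : List (String × String)) (bracesInfo : List (String × List (String × String))) (out : (List (String × String)) × (List (List (String × String)))) : Prop := out = separateFunctions_alt lines bracesInfo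
instance (lines : List (String × String)) (bracesInfo : List (String × List (String × String))) (out : (List (String × String)) × (List (List (String × String)))) : Decidable (Spec_separateFunctions lines bracesInfo out) := by unfold Spec_separateFunctions; infer_instance

-- ===== CLAIM (what is proved, stated in full; the proofs are below) =====
def Claim_equal_separateFunctions : Prop := ∀ (lines : List (String × String)) (bracesInfo : List (String × List (String × String))), Dom_separateFunctions lines bracesInfo → Pre_separateFunctions lines bracesInfo → Spec_separateFunctions lines bracesInfo (separateFunctions lines bracesInfo)

-- ===== LEMMAS AND PROOFS =====

-- decimal digit string of a Nat, most significant first (proof-side model of Nat.toDigits 10)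
def pvDigits (n : Nat) : List Char :=
  if _h : n < 10 then [Nat.digitChar n]
  else pvDigits (n / 10) ++ [Nat.digitChar (n % 10)]
decreasing_by exact Nat.div_lt_self (by omega) (by omega)

lemma pvToDigitsCore_eq : ∀ (fuel n : Nat) (acc : List Char), n < fuel →
    Nat.toDigitsCore 10 fuel n acc = pvDigits n ++ acc := by
  intro fuel
  induction fuel with
  | zero => omega
  | succ f ih =>
    intro n acc h
    rw [Nat.toDigitsCore]
    by_cases h10 : n / 10 = 0
    · have hn : n < 10 := by omega
      rw [pvDigits]
      simp [h10, hn, Nat.mod_eq_of_lt hn]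
    · have hlt : n / 10 < f := by
        have := Nat.div_lt_self (by omega : 0 < n) (by omega : 1 < 10)
        omega
      rw [if_neg h10, ih _ _ hlt]
      conv_rhs => rw [pvDigits]
      have hn : ¬ n < 10 := by omega
      rw [dif_neg hn]
      simp

lemma pvToDigits_eq (n : Nat) : Nat.toDigits 10 n = pvDigits n := by
  rw [Nat.toDigits, pvToDigitsCore_eq (n + 1) n [] (by omega), List.append_nil]

lemma pvDigitChar_lt_10 (d : Nat) (h : d < 10) :
    ('0' ≤ Nat.digitChar d ∧ Nat.digitChar d ≤ '9') ∧ (Nat.digitChar d).toNat = 48 + d := by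
  interval_cases d <;> exact ⟨by decide, by decide⟩

lemma pvDigits_digits (n : Nat) : ∀ c ∈ pvDigits n, '0' ≤ c ∧ c ≤ '9' := by
  induction n using pvDigits.induct with
  | case1 n h =>
    rw [pvDigits]; simp [h]
    exact (pvDigitChar_lt_10 n h).1
  | case2 n h ih =>
    rw [pvDigits]; simp [h]
    intro c hc
    rcases hc with hc | hc
    · exact ih c hc
    · subst hc; exact (pvDigitChar_lt_10 _ (Nat.mod_lt _ (by omega))).1

lemma pvDigits_ne_nil (n : Nat) : pvDigits n ≠ [] := by
  rw [pvDigits]; split <;> simp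

lemma pvDigits_val (n : Nat) :
    (pvDigits n).foldl (fun (a : Int) c => a * 10 + ((c.toNat : Int) - 48)) 0 = (n : Int) := by
  induction n using pvDigits.induct with
  | case1 n h =>
    rw [pvDigits]
    simp [h, (pvDigitChar_lt_10 n h).2]
  | case2 n h ih =>
    rw [pvDigits, dif_neg h]
    simp only [List.foldl_append, ih, List.foldl_cons, List.foldl_nil]
    rw [(pvDigitChar_lt_10 _ (Nat.mod_lt _ (by omega : 0 < 10))).2]
    have := Nat.div_add_mod n 10
    push_cast
    omega

lemma pvRead_toStr (n : Int) : pvRead (PySem.Int.toStr n) = some n := by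
  rcases lt_or_ge n 0 with hneg | hpos
  · have htc : PySem.Int.toChars n = '-' :: pvDigits n.natAbs := by
      rw [PySem.Int.toChars, if_pos hneg, pvToDigits_eq]
    rw [pvRead, PySem.Int.toStr, htc]
    have hsw : PySem.Str.startswith (String.ofList ('-' :: pvDigits n.natAbs)) "-" = true := by
      simp [PySem.Str.startswith_eq, String.toList_ofList, PySem.Chars.startswith, List.isPrefixOf]
    have hsl : (PySem.Str.slice (String.ofList ('-' :: pvDigits n.natAbs)) (some 1) none).toList
        = pvDigits n.natAbs := by
      simp [PySem.Str.slice, String.toList_ofList, PySem.Chars.slice_eq_listSlice,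
        PySem.List.slice_from (a := 1) _ (by omega)]
    simp only [hsw, hsl, if_pos]
    have hne : (pvDigits n.natAbs).isEmpty = false := by
      simp [List.isEmpty_iff, pvDigits_ne_nil]
    have hall : (pvDigits n.natAbs).all (fun c => decide ('0' ≤ c) && decide (c ≤ '9')) = true := by
      simp only [List.all_eq_true]
      intro c hc
      have := pvDigits_digits _ c hc
      simp [this.1, this.2]
    rw [hne, hall]
    simp only [Bool.false_eq_true, if_false, Bool.not_true, Bool.or_self, if_true,
      pvDigits_val, Option.some_inj]
    omega
  · have htc : PySem.Int.toChars n = pvDigits n.toNat := by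
      rw [PySem.Int.toChars, if_neg (by omega), pvToDigits_eq]
    rw [pvRead, PySem.Int.toStr, htc]
    have hsw : PySem.Str.startswith (String.ofList (pvDigits n.toNat)) "-" = false := by
      simp only [PySem.Str.startswith_eq, String.toList_ofList]
      rcases hh : pvDigits n.toNat with _ | ⟨c, t⟩
      · exact absurd hh (pvDigits_ne_nil _)
      · have hc : '0' ≤ c ∧ c ≤ '9' := pvDigits_digits _ c (hh ▸ List.mem_cons_self)
        simp [PySem.Chars.startswith, List.isPrefixOf]
        intro h
        subst h
        revert hc; decide
    simp only [hsw, if_neg, Bool.false_eq_true, if_false, String.toList_ofList]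
    have hne : (pvDigits n.toNat).isEmpty = false := by
      simp [List.isEmpty_iff, pvDigits_ne_nil]
    have hall : (pvDigits n.toNat).all (fun c => decide ('0' ≤ c) && decide (c ≤ '9')) = true := by
      simp only [List.all_eq_true]
      intro c hc
      have := pvDigits_digits _ c hc
      simp [this.1, this.2]
    rw [hne, hall]
    simp only [Bool.false_eq_true, if_false, Bool.not_true, Bool.or_self, if_true,
      pvDigits_val, Option.some_inj]
    omega

lemma pvCanonVal?_toStr (n : Int) : pvCanonVal? (PySem.Int.toStr n) = some n := by
  simp [pvCanonVal?, pvRead_toStr]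

lemma pvToStr_inj : Function.Injective PySem.Int.toStr := by
  intro a b h
  have := pvCanonVal?_toStr a
  rw [h, pvCanonVal?_toStr b] at this
  exact (Option.some_inj.mp this).symm

lemma pvPyRange_pairwise (s b : Int) :
    (PySem.List.pyRange s b 1).Pairwise (· < ·) := by
  rw [PySem.List.pyRange]
  simp only [if_neg (by norm_num : ¬ (1 : Int) = 0)]
  split
  · refine List.Pairwise.map _ ?_ List.pairwise_lt_range
    intro a b hab
    omega
  · refine List.Pairwise.map _ ?_ List.pairwise_lt_range
    intro a b hab
    omega

lemma pvFilt_pairwise (d : PySem.Dict String String) (s e : Int) :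
    ((PySem.List.pyRange s (e + 1) 1).filter
      (fun op => d.contains (PySem.Int.toStr op))).Pairwise (· < ·) :=
  (pvPyRange_pairwise s (e + 1)).filter _

lemma pvR_nodup (d : PySem.Dict String String) (s e : Int) :
    (((PySem.List.pyRange s (e + 1) 1).filter
      (fun op => d.contains (PySem.Int.toStr op))).map PySem.Int.toStr).Nodup :=
  List.Nodup.map pvToStr_inj ((pvFilt_pairwise d s e).imp ne_of_lt)

lemma pvSel_eq (d : PySem.Dict String String) (s e : Int) (hnd : d.keys.Nodup)
    (hC : ∀ k ∈ d.keys, pvKeyC k)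
    (hNC : ∀ k ∈ d.keys, ∀ v, PySem.Int.ofStr? k = some v → s ≤ v → v ≤ e →
      PySem.Int.toStr v = k) :
    PySem.List.sorted
      (d.keys.filter (fun k =>
        match pvLineNo k with
        | none => false
        | some n => decide (s ≤ n) && decide (n ≤ e)))
      (fun k => (PySem.Int.ofStr? k).getD 0)
    = ((PySem.List.pyRange s (e + 1) 1).filter
        (fun op => d.contains (PySem.Int.toStr op))).map PySem.Int.toStr := by
  set P : String → Bool := fun k =>
    match pvLineNo k with
    | none => false
    | some n => decide (s ≤ n) && decide (n ≤ e) with hP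
  set R : List String := ((PySem.List.pyRange s (e + 1) 1).filter
      (fun op => d.contains (PySem.Int.toStr op))).map PySem.Int.toStr with hR
  have hkey : ∀ v : Int, PySem.Int.toStr v ∈ d.keys →
      PySem.Int.ofStr? (PySem.Int.toStr v) = some v := by
    intro v hv
    have := hC _ hv
    simp only [pvKeyC, pvCanonVal?_toStr, beq_iff_eq] at this
    exact this
  have hRpw : R.Pairwise (fun a b => (PySem.Int.ofStr? a).getD 0 < (PySem.Int.ofStr? b).getD 0) := by
    rw [hR, List.pairwise_map]
    refine List.Pairwise.imp_of_mem ?_ (pvFilt_pairwise d s e)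
    intro a b ha hb hab
    rw [List.mem_filter] at ha hb
    have ha' := hkey a ((PySem.Dict.contains_iff_mem_keys d _).mp ha.2)
    have hb' := hkey b ((PySem.Dict.contains_iff_mem_keys d _).mp hb.2)
    simpa [ha', hb'] using hab
  have hRnd : R.Nodup := pvR_nodup d s e
  have hmem : ∀ k, k ∈ d.keys.filter P ↔ k ∈ R := by
    intro k
    simp only [List.mem_filter, hR, List.mem_map, List.mem_filter,
      PySem.List.mem_pyRange_one]
    constructor
    · rintro ⟨hk, hPk⟩
      simp only [hP, pvLineNo] at hPk
      rcases hv : PySem.Int.ofStr? k with _ | v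
      · rw [hv] at hPk; simp at hPk
      · rw [hv] at hPk
        simp only [Bool.and_eq_true, decide_eq_true_eq] at hPk
        obtain ⟨hsv, hve⟩ := hPk
        have hts := hNC k hk v hv hsv hve
        refine ⟨v, ⟨⟨hsv, by omega⟩, ?_⟩, hts⟩
        rw [hts]
        exact (PySem.Dict.contains_iff_mem_keys d k).mpr hk
    · rintro ⟨v, ⟨⟨hsv, hve⟩, hcont⟩, hts⟩
      subst hts
      have hkeys := (PySem.Dict.contains_iff_mem_keys d _).mp hcont
      refine ⟨hkeys, ?_⟩
      simp only [hP, pvLineNo, hkey v hkeys]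
      simp [hsv]
      omega
  have hperm : R.Perm (d.keys.filter P) := by
    refine List.Subperm.antisymm ?_ ?_
    · exact List.subperm_of_subset hRnd (fun k hk => (hmem k).mpr hk)
    · exact List.subperm_of_subset (hnd.filter P) (fun k hk => (hmem k).mp hk)
  exact PySem.List.sorted_eq_of_perm_of_pairwise_lt _ _ _ hperm hRpw

lemma pvKeys_erase (d : PySem.Dict String String) (k : String) :
    (d.erase k).keys = d.keys.filter (fun x => !(x == k)) := by
  show (d.items.filter _).map Prod.fst = (d.items.map Prod.fst).filter _
  rw [List.filter_map]
  rfl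

lemma pvErase_fold_keys (ks : List String) :
    ∀ (d : PySem.Dict String String), d.keys.Nodup →
      (ks.foldl (fun d k => d.erase k) d).keys.Nodup ∧
      ∀ k ∈ (ks.foldl (fun d k => d.erase k) d).keys, k ∈ d.keys := by
  induction ks with
  | nil => intro d h; exact ⟨h, fun _ hk => hk⟩
  | cons k t ih =>
    intro d h
    have h' : (d.erase k).keys.Nodup := by
      rw [pvKeys_erase]; exact h.filter _
    obtain ⟨hnd, hsub⟩ := ih (d.erase k) h'
    refine ⟨hnd, fun x hx => ?_⟩
    have := hsub x hx
    rw [pvKeys_erase, List.mem_filter] at this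
    exact this.1

-- the getD-based bounds computed by the ports equal pvInfoRange
lemma pvRange_eq (info : PySem.Dict String String) (x : String) :
    ((info.get? x).bind PySem.Int.ofStr?).getD 0 = pvToIntD (info.getD x "") := by
  rw [pvToIntD, PySem.Dict.getD_eq_get?_getD]
  rcases h : info.get? x with _ | s
  · simp [show PySem.Int.ofStr? "" = none from by decide]
  · simp

-- one loop iteration: A's state (lines, funcs, {}) tracks B's state (lines, funcs)
lemma pvStep_eq (b : List (String × List (String × String)))
    (l : PySem.Dict String String) (fs : List (PySem.Dict String String))
    (info : PySem.Dict String String) (hnd : l.keys.Nodup)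
    (hk : ∀ k ∈ l.keys, pvKeyC k ∧ pvKeyNC b k)
    (hinfo : ∃ p ∈ b, PySem.Dict.ofList p.2 = info) :
    pvStepA (l, fs, PySem.Dict.empty) info
      = ((pvStepB (l, fs) info).1, (pvStepB (l, fs) info).2, PySem.Dict.empty)
    ∧ (pvStepB (l, fs) info).1.keys.Nodup
    ∧ ∀ k ∈ (pvStepB (l, fs) info).1.keys, k ∈ l.keys := by
  rcases hc : info.contains "ctrlFlowStatement" with _ | _
  · have hg : info.get? "ctrlFlowStatement" = none :=
      (PySem.Dict.get?_eq_none_iff_contains info "ctrlFlowStatement").mpr hc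
    have hA : pvStepA (l, fs, PySem.Dict.empty) info = (l, fs, PySem.Dict.empty) := by
      rw [pvStepA, hc]; simp
    have hB : pvStepB (l, fs) info = (l, fs) := by
      rw [pvStepB, hg]; simp
    rw [hA, hB]
    exact ⟨rfl, hnd, fun _ h => h⟩
  · rw [PySem.Dict.contains_eq_isSome_get?] at hc
    obtain ⟨p, hp⟩ := Option.isSome_iff_exists.mp hc
    by_cases hw : p = "func"
    · subst hw
      have hc' : info.contains "ctrlFlowStatement" = true := by
        rw [PySem.Dict.contains_eq_isSome_get?, hp]; rfl
      rw [pvStepA, pvStepB, hc', hp]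
      have hgd : info.getD "ctrlFlowStatement" "" = "func" := by
        rw [PySem.Dict.getD_eq_get?_getD, hp]; rfl
      rw [hgd]
      simp only [Bool.true_eq_false, if_false, bne_self_eq_false, Bool.false_eq_true]
      set s := pvToIntD (info.getD "startOp" "") with hs
      set e := pvToIntD (info.getD "endOp" "") with he
      set R : List String := ((PySem.List.pyRange s (e + 1) 1).filter
          (fun op => l.contains (PySem.Int.toStr op))).map PySem.Int.toStr with hRdef
      have hNC : ∀ k ∈ l.keys, ∀ v, PySem.Int.ofStr? k = some v → s ≤ v → v ≤ e →
          PySem.Int.toStr v = k := by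
        intro k hkk v hv hsv hve
        have hknc := (hk k hkk).2
        simp only [pvKeyNC, hv, Bool.or_eq_true, Bool.not_eq_true', beq_iff_eq] at hknc
        rcases hknc with hknc | hknc
        · exfalso
          obtain ⟨q, hq, hq2⟩ := hinfo
          have : pvInRangeB b v = true := by
            rw [pvInRangeB, List.any_eq_true]
            refine ⟨q, hq, ?_⟩
            simp only [hq2, Bool.and_eq_true, beq_iff_eq, decide_eq_true_eq]
            refine ⟨⟨hp, ?_⟩, ?_⟩
            · show (pvInfoRange info).1 ≤ v
              rw [pvInfoRange]
              simpa [pvRange_eq info "startOp"] using hsv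
            · show v ≤ (pvInfoRange info).2
              rw [pvInfoRange]
              simpa [pvRange_eq info "endOp"] using hve
          rw [this] at hknc; exact Bool.noConfusion hknc
        · exact hknc
      have hflip : (fun (cr : PySem.Dict String String × List String) op =>
            if l.contains (PySem.Int.toStr op) = false then cr
            else (cr.1.insert (PySem.Int.toStr op) (l.getD (PySem.Int.toStr op) ""),
                  cr.2 ++ [PySem.Int.toStr op]))
          = (fun (cr : PySem.Dict String String × List String) op =>
            ((fun (c : PySem.Dict String String) op =>
                if l.contains (PySem.Int.toStr op) = true then
                  c.insert (PySem.Int.toStr op) (l.getD (PySem.Int.toStr op) "") else c) cr.1 op,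
             (fun (r : List String) op =>
                if l.contains (PySem.Int.toStr op) = true then r ++ [PySem.Int.toStr op] else r) cr.2 op)) := by
        funext cr op
        rcases h : l.contains (PySem.Int.toStr op) <;> simp [h]
      rw [hflip, PySem.List.foldl_prod_mk
        (f := fun (c : PySem.Dict String String) op =>
          if l.contains (PySem.Int.toStr op) = true then
            c.insert (PySem.Int.toStr op) (l.getD (PySem.Int.toStr op) "") else c)
        (g := fun (r : List String) op =>
          if l.contains (PySem.Int.toStr op) = true then r ++ [PySem.Int.toStr op] else r)]
      have hrem : ((PySem.List.pyRange s (e + 1) 1).foldl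
          (fun (r : List String) op =>
            if l.contains (PySem.Int.toStr op) = true then r ++ [PySem.Int.toStr op] else r) []) = R := by
        rw [PySem.List.foldl_append_if (fun op => l.contains (PySem.Int.toStr op)) PySem.Int.toStr]
        simp [hRdef]
      have hcf : ((PySem.List.pyRange s (e + 1) 1).foldl
          (fun (c : PySem.Dict String String) op =>
            if l.contains (PySem.Int.toStr op) = true then
              c.insert (PySem.Int.toStr op) (l.getD (PySem.Int.toStr op) "") else c) PySem.Dict.empty)
          = R.foldl (fun (d : PySem.Dict String String) k => d.insert k (l.getD k "")) PySem.Dict.empty := by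
        rw [PySem.List.foldl_if_eq_foldl_filter (fun op => l.contains (PySem.Int.toStr op))]
        rw [hRdef, List.foldl_map]
      have hsel : PySem.List.sorted
          (l.keys.filter (fun k =>
            match pvLineNo k with
            | none => false
            | some n => decide (s ≤ n) && decide (n ≤ e)))
          (fun k => (PySem.Int.ofStr? k).getD 0) = R :=
        pvSel_eq l s e hnd (fun k hkk => (hk k hkk).1) hNC
      have hset : PySem.Set.ofList R = R :=
        PySem.Set.ofList_eq_self_of_nodup R (pvR_nodup l s e)
      obtain ⟨hnd', hsub'⟩ := pvErase_fold_keys R l hnd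
      simp only [hrem, hcf, hsel, hset]
      exact ⟨trivial, hnd', hsub'⟩
    · have hc' : info.contains "ctrlFlowStatement" = true := by
        rw [PySem.Dict.contains_eq_isSome_get?, hp]; rfl
      have hgd : info.getD "ctrlFlowStatement" "" = p := by
        rw [PySem.Dict.getD_eq_get?_getD, hp]; rfl
      rw [pvStepA, pvStepB, hc', hp, hgd]
      simp only [bne_iff_ne, ne_eq, hw, not_false_iff, if_true,
        show (some p != some "func") = true from by simp [hw]]
      exact ⟨by simp [hw], hnd, fun _ h => h⟩

lemma pvFold_eq (b : List (String × List (String × String)))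
    (vals : List (PySem.Dict String String)) :
    ∀ (l : PySem.Dict String String) (fs : List (PySem.Dict String String)),
      l.keys.Nodup →
      (∀ k ∈ l.keys, pvKeyC k ∧ pvKeyNC b k) →
      (∀ info ∈ vals, ∃ p ∈ b, PySem.Dict.ofList p.2 = info) →
      vals.foldl pvStepA (l, fs, PySem.Dict.empty)
        = ((vals.foldl pvStepB (l, fs)).1, (vals.foldl pvStepB (l, fs)).2, PySem.Dict.empty) := by
  induction vals with
  | nil => intro l fs _ _ _; rfl
  | cons info rest ih =>
    intro l fs hnd hk hvals
    obtain ⟨hstep, hnd', hsub⟩ := pvStep_eq b l fs info hnd hk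
      (hvals info List.mem_cons_self)
    simp only [List.foldl_cons, hstep]
    have := ih (pvStepB (l, fs) info).1 (pvStepB (l, fs) info).2 hnd'
      (fun k hkk => hk k (hsub k hkk))
      (fun i hi => hvals i (List.mem_cons_of_mem _ hi))
    simpa using this

lemma pvItems_ofList_mem {κ ν : Type} [BEq κ] [LawfulBEq κ] (l : List (κ × ν)) :
    ∀ p ∈ (PySem.Dict.ofList l).items, p ∈ l := by
  suffices h : ∀ (l : List (κ × ν)) (d : PySem.Dict κ ν),
      ∀ p ∈ (d.update l).items, p ∈ d.items ∨ p ∈ l by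
    intro p hp
    rcases h l PySem.Dict.empty p hp with h' | h'
    · simp [PySem.Dict.empty, PySem.Dict.items] at h'
    · exact h'
  intro l
  induction l with
  | nil => intro d p hp; exact Or.inl hp
  | cons q t ih =>
    intro d p hp
    rcases ih (d.insert q.1 q.2) p hp with h' | h'
    · rw [PySem.Dict.mem_items_insert] at h'
      rcases h' with h' | h'
      · exact Or.inr (by simp [h'])
      · exact Or.inl h'.1
    · exact Or.inr (List.mem_cons_of_mem _ h')

-- ===== VERDICT (by name: the statement is the Claim_ definition above) =====
theorem separateFunctions_spec : Claim_equal_separateFunctions := by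
  intro lines bracesInfo _ hpre
  show separateFunctions lines bracesInfo = separateFunctions_alt lines bracesInfo
  simp only [separateFunctions, separateFunctions_alt]
  rw [pvFold_eq bracesInfo _ _ _ (PySem.Dict.nodup_keys_ofList lines)
    (fun k hkk => by
      simp only [PySem.Dict.keys, List.mem_map] at hkk
      obtain ⟨p, hp, hpk⟩ := hkk
      have := hpre.2 p (pvItems_ofList_mem lines p hp)
      rwa [hpk] at this)
    (fun info hinfo => by
      simp only [PySem.Dict.values, List.mem_map] at hinfo
      obtain ⟨p, hp, hpv⟩ := hinfo
      have hm := pvItems_ofList_mem _ p hp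
      rw [List.mem_map] at hm
      obtain ⟨q, hq, hq2⟩ := hm
      exact ⟨q, hq, by rw [show PySem.Dict.ofList q.2 = p.2 from congrArg Prod.snd hq2, hpv]⟩)]
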